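-- pv_equiv track=rewrite | github.com/ricardochaves/chat-wars-database | chat_wars_database/app/business_exchange/management/commands/calculate_statistics.py | get_min_value_date
-- ===== SOURCE A (Python) =====
-- from typing import Dict
-- from typing import List
-- from typing import Tuple
--
-- def get_min_value_date(values_by_list: List[Dict]) -> Tuple[int, int]:
--     """
--     {"value": 100, "message_id": 1234]}
--     """
--
--     v = values_by_list[0]["value"]
--     m = values_by_list[0]["message_id"]
--
--     for x in values_by_list:
--         check = v > x["value"]
--         v = x["value"] if check else v
--         m = x["message_id"] if check else m
--
--     return v, m
-- ===== SOURCE B (Python) =====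
-- def get_min_value_date(values_by_list):
--     best = sorted(values_by_list, key=lambda x: x["value"])[0]
--     return best["value"], best["message_id"]
-- ===== Notes on version B (the rewrite author's own statement) =====
-- stated objective: simpler
-- what changed: Replaces the explicit running-minimum loop over parallel v/m variables with a stable sort by the 'value' field followed by taking the first element; stability preserves first-minimum tie-breaking.
import Mathlib
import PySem

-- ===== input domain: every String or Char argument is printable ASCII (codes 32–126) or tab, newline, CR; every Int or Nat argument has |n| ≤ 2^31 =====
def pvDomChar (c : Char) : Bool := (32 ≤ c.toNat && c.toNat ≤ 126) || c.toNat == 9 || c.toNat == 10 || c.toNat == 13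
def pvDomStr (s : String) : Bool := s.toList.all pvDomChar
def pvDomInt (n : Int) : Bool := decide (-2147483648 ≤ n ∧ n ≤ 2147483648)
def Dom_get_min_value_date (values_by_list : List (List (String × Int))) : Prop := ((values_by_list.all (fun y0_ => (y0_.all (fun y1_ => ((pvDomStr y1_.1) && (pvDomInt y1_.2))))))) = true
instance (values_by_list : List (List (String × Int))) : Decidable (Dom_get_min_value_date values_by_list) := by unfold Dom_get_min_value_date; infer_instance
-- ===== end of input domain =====

-- B replaces A's running-minimum loop by a stable sort on the "value" field plus taking the
-- first element (simpler, not faster); equivalence is about the return value only.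

-- ===== PORT A =====
-- x["value"] / x["message_id"]: Pre_ guarantees the key is present, so .getD 0 is never the
-- default inside Pre_ (Python raises KeyError exactly where get? is none).
def get_min_value_date (values_by_list : List (List (String × Int))) : Int × Int :=
  let d := (PySem.List.pyGet? values_by_list 0).getD []
  let v := (PySem.Dict.get? (PySem.Dict.mk d) "value").getD 0
  let m := (PySem.Dict.get? (PySem.Dict.mk d) "message_id").getD 0
  values_by_list.foldl
    (fun (vm : Int × Int) x =>
      let check := vm.1 > (PySem.Dict.get? (PySem.Dict.mk x) "value").getD 0
      (if check then (PySem.Dict.get? (PySem.Dict.mk x) "value").getD 0 else vm.1,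
       if check then (PySem.Dict.get? (PySem.Dict.mk x) "message_id").getD 0 else vm.2))
    (v, m)

-- ===== PORT B =====
def get_min_value_date_alt (values_by_list : List (List (String × Int))) : Int × Int :=
  let best := (PySem.List.pyGet?
      (PySem.List.sorted values_by_list (fun x => (PySem.Dict.get? (PySem.Dict.mk x) "value").getD 0)) 0).getD []
  ((PySem.Dict.get? (PySem.Dict.mk best) "value").getD 0, (PySem.Dict.get? (PySem.Dict.mk best) "message_id").getD 0)

-- ===== PRECONDITION & SPEC =====
-- the "value" key of an entry, as both ports read it
def pvKey (x : List (String × Int)) : Int := (PySem.Dict.get? (PySem.Dict.mk x) "value").getD 0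

-- Pre_: exactly where the Python A returns: a nonempty list (else IndexError), every dict has
-- the "value" key, and every dict that is a strict running minimum of the "value" fields (the
-- only dicts whose "message_id" A ever reads, the first dict included) has the "message_id" key
-- (else KeyError).
def Pre_get_min_value_date (values_by_list : List (List (String × Int))) : Prop :=
  values_by_list ≠ [] ∧
  (∀ x ∈ values_by_list, (PySem.Dict.get? (PySem.Dict.mk x) "value").isSome = true) ∧
  ∀ i, i < values_by_list.length →
    (∀ j, j < i → pvKey (values_by_list[i]!) < pvKey (values_by_list[j]!)) →
    (PySem.Dict.get? (PySem.Dict.mk (values_by_list[i]!)) "message_id").isSome = true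
instance (values_by_list : List (List (String × Int))) : Decidable (Pre_get_min_value_date values_by_list) := by unfold Pre_get_min_value_date; infer_instance

def pvWitness_get_min_value_date : (List (List (String × Int))) :=
  [[("value", 5), ("message_id", 10)], [("value", 3), ("message_id", 7)]]

def Spec_get_min_value_date (values_by_list : List (List (String × Int))) (out : Int × Int) : Prop := out = get_min_value_date_alt values_by_list
instance (values_by_list : List (List (String × Int))) (out : Int × Int) : Decidable (Spec_get_min_value_date values_by_list out) := by unfold Spec_get_min_value_date; infer_instance

-- ===== CLAIM (what is proved, stated in full; the proofs are below) =====
def Claim_equal_get_min_value_date : Prop := ∀ (values_by_list : List (List (String × Int))), Dom_get_min_value_date values_by_list → Pre_get_min_value_date values_by_list → Spec_get_min_value_date values_by_list (get_min_value_date values_by_list)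

-- ===== LEMMAS AND PROOFS =====

-- the "message_id" key of an entry
def pvMid (x : List (String × Int)) : Int := (PySem.Dict.get? (PySem.Dict.mk x) "message_id").getD 0
-- the first element of c :: t with strictly minimal pvKey (strict update = first-wins)
def pvFirstMin (t : List (List (String × Int))) (c : List (String × Int)) : List (String × Int) :=
  t.foldl (fun c x => if pvKey x < pvKey c then x else c) c

-- head of an insertBy step
theorem head?_insertBy (x : List (String × Int)) (l : List (List (String × Int))) :
    (PySem.List.insertBy (fun a b => decide (pvKey a < pvKey b)) x l).head? =
      some (match l.head? with
            | none => x
            | some y => if pvKey x < pvKey y then x else y) := by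
  cases l with
  | nil => simp [PySem.List.insertBy]
  | cons y ys =>
      simp only [PySem.List.insertBy, List.head?]
      by_cases h : pvKey x < pvKey y <;> simp [h]

-- invariant of the insertion-sort fold: the head of the accumulator is the first minimum so far
theorem head?_foldl_insertBy (t : List (List (String × Int)))
    (acc : List (List (String × Int))) (c : List (String × Int)) (h : acc.head? = some c) :
    ((t.foldl (fun acc x => PySem.List.insertBy (fun a b => decide (pvKey a < pvKey b)) x acc) acc).head?) =
      some (pvFirstMin t c) := by
  induction t generalizing acc c with
  | nil => simpa [pvFirstMin] using h
  | cons x xs ih =>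
      simp only [List.foldl_cons, pvFirstMin, List.foldl_cons]
      exact ih _ _ (by rw [head?_insertBy, h])

-- the head of B's stable sort is the first minimum
theorem head?_sorted (c : List (String × Int)) (t : List (List (String × Int))) :
    (PySem.List.sorted (c :: t) pvKey).head? = some (pvFirstMin t c) := by
  rw [PySem.List.sorted_eq_foldl_insertBy]
  simp only [List.foldl_cons]
  exact head?_foldl_insertBy t _ c (by simp [PySem.List.insertBy])

-- A's loop keeps exactly the (value, message_id) pair of the first minimum
theorem foldl_A_eq (t : List (List (String × Int))) (c : List (String × Int)) :
    t.foldl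
      (fun (vm : Int × Int) x =>
        let check := vm.1 > (PySem.Dict.get? (PySem.Dict.mk x) "value").getD 0
        (if check then (PySem.Dict.get? (PySem.Dict.mk x) "value").getD 0 else vm.1,
         if check then (PySem.Dict.get? (PySem.Dict.mk x) "message_id").getD 0 else vm.2))
      (pvKey c, pvMid c) = (pvKey (pvFirstMin t c), pvMid (pvFirstMin t c)) := by
  induction t generalizing c with
  | nil => simp [pvFirstMin]
  | cons x xs ih =>
      simp only [List.foldl_cons, pvFirstMin, List.foldl_cons]
      by_cases hx : pvKey x < pvKey c
      · have : ((PySem.Dict.get? (PySem.Dict.mk c) "value").getD 0 > (PySem.Dict.get? (PySem.Dict.mk x) "value").getD 0) = True := by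
          simp [pvKey] at hx; simp [hx]
        simpa [pvKey, pvMid, this] using ih x
      · have : ((PySem.Dict.get? (PySem.Dict.mk c) "value").getD 0 > (PySem.Dict.get? (PySem.Dict.mk x) "value").getD 0) = False := by
          simp [pvKey] at hx; simp [hx, not_lt]
        simpa [pvKey, pvMid, this] using ih c

-- ===== VERDICT (by name: the statement is the Claim_ definition above) =====
theorem get_min_value_date_spec : Claim_equal_get_min_value_date := by
  intro l _ hpre
  obtain ⟨hne, _⟩ := hpre
  obtain ⟨c, t, rfl⟩ := List.exists_cons_of_ne_nil hne
  show get_min_value_date (c :: t) = get_min_value_date_alt (c :: t)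
  -- B's side: the first element of the sort
  have hB : get_min_value_date_alt (c :: t) =
      (pvKey (pvFirstMin t c), pvMid (pvFirstMin t c)) := by
    have hs := head?_sorted c t
    unfold get_min_value_date_alt
    cases hsrt : PySem.List.sorted (c :: t) pvKey with
    | nil => rw [hsrt] at hs; simp at hs
    | cons b bs =>
        have hb : b = pvFirstMin t c := by rw [hsrt] at hs; simpa using hs
        have : PySem.List.sorted (c :: t)
            (fun x => (PySem.Dict.get? (PySem.Dict.mk x) "value").getD 0) = b :: bs := hsrt
        rw [this]
        simp [PySem.List.pyGet?, PySem.List.pyIdx?, hb, pvKey, pvMid]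
  -- A's side: the first loop step leaves the state unchanged, then foldl_A_eq
  have hA : get_min_value_date (c :: t) =
      (pvKey (pvFirstMin t c), pvMid (pvFirstMin t c)) := by
    unfold get_min_value_date
    have h0 : (PySem.List.pyGet? (c :: t) 0).getD [] = c := by
      simp [PySem.List.pyGet?, PySem.List.pyIdx?]
    rw [h0]
    simp only [List.foldl_cons]
    have hch : ¬ ((PySem.Dict.get? (PySem.Dict.mk c) "value").getD 0 > (PySem.Dict.get? (PySem.Dict.mk c) "value").getD 0) := by
      omega
    simpa [hch, pvKey, pvMid] using foldl_A_eq t c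
  rw [hA, hB]
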